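-- pv_equiv track=rewrite | github.com/ML-flash/ARI_Benchmark | architecture/Theory_Sim/theory_sim3.py | rescan_inside
-- ===== SOURCE A (Python) =====
-- ENC_OPEN      = 0
--
-- ENC_CLOSE     = 1
--
-- def rescan_inside(org, idx):
--     inside = False
--     for j in range(min(idx + 1, len(org))):
--         if org[j] == ENC_OPEN:
--             inside = True
--         elif org[j] == ENC_CLOSE:
--             inside = False
--     return inside
-- ===== SOURCE B (Python) =====
-- ENC_OPEN = 0
--
-- ENC_CLOSE = 1
--
-- def rescan_inside(org, idx):
--     j = min(idx + 1, len(org)) - 1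
--     while j >= 0:
--         v = org[j]
--         if v == ENC_OPEN:
--             return True
--         if v == ENC_CLOSE:
--             return False
--         j -= 1
--     return False
-- ===== Notes on version B (the rewrite author's own statement) =====
-- stated objective: alternative
-- what changed: Replaces the forward overwrite-accumulator scan of the whole prefix by a backward search that returns immediately at the last OPEN/CLOSE token in the prefix.
import Mathlib
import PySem

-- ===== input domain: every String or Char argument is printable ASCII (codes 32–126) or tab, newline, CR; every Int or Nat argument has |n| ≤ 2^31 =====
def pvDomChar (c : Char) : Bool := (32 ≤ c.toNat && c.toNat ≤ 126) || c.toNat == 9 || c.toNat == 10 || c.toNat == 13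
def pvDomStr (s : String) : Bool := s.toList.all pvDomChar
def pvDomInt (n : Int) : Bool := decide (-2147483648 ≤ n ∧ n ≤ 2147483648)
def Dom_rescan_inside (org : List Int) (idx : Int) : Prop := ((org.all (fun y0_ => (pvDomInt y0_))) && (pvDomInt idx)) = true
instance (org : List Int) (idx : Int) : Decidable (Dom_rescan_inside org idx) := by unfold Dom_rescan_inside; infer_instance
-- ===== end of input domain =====

-- B replaces A's forward overwrite-accumulator scan of the prefix by a backward
-- early-return search for the last OPEN/CLOSE token (objective: alternative).

-- ===== PORT A =====
-- for j in range(min(idx + 1, len(org))): overwrite `inside` on OPEN/CLOSE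
def rescan_inside (org : List Int) (idx : Int) : Bool :=
  (PySem.List.pyRange 0 (min (idx + 1) (org.length : Int)) 1).foldl
    (fun inside j =>
      let v := PySem.List.pyGetD org j 0
      if v = 0 then true else if v = 1 then false else inside) false

-- ===== PORT B =====
-- while j >= 0 downward loop, ported as structural recursion on j+1 (the count
-- of remaining indices); index examined at fuel n+1 is n.
def rescanBack (org : List Int) : Nat → Bool
  | 0 => false
  | n+1 =>
    let v := PySem.List.pyGetD org (n : Int) 0
    if v = 0 then true else if v = 1 then false else rescanBack org n

def rescan_inside_alt (org : List Int) (idx : Int) : Bool :=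
  rescanBack org ((min (idx + 1) (org.length : Int)).toNat)

-- ===== PRECONDITION & SPEC =====
def Spec_rescan_inside (org : List Int) (idx : Int) (out : Bool) : Prop := out = rescan_inside_alt org idx
instance (org : List Int) (idx : Int) (out : Bool) : Decidable (Spec_rescan_inside org idx out) := by unfold Spec_rescan_inside; infer_instance

-- ===== CLAIM (what is proved, stated in full; the proofs are below) =====
def Claim_equal_rescan_inside : Prop := ∀ (org : List Int) (idx : Int), Dom_rescan_inside org idx → Spec_rescan_inside org idx (rescan_inside org idx)

-- ===== LEMMAS AND PROOFS =====
theorem rescan_foldl_eq_back (org : List Int) (n : Nat) :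
    (PySem.List.pyRange 0 (n : Int) 1).foldl
      (fun inside j =>
        let v := PySem.List.pyGetD org j 0
        if v = 0 then true else if v = 1 then false else inside) false
    = rescanBack org n := by
  induction n with
  | zero => simp [PySem.List.pyRange_one_eq_nil, rescanBack]
  | succ n ih =>
    have h : ((n : Int) + 1) = ((n + 1 : Nat) : Int) := by push_cast; ring
    rw [← h, PySem.List.pyRange_one_succ_right (by positivity)]
    rw [List.foldl_append, ih]
    simp only [List.foldl, rescanBack]

theorem rescan_inside_eq (org : List Int) (idx : Int) :
    rescan_inside org idx = rescan_inside_alt org idx := by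
  unfold rescan_inside rescan_inside_alt
  set m : Int := min (idx + 1) (org.length : Int) with hm
  rcases le_or_gt m 0 with h | h
  · rw [PySem.List.pyRange_one_eq_nil h]
    have : m.toNat = 0 := Int.toNat_of_nonpos h
    rw [this]
    simp [rescanBack]
  · have : m = ((m.toNat : Nat) : Int) := (Int.toNat_of_nonneg h.le).symm
    rw [this]
    exact rescan_foldl_eq_back org m.toNat

-- ===== VERDICT (by name: the statement is the Claim_ definition above) =====
theorem rescan_inside_spec : Claim_equal_rescan_inside := by
  intro org idx _
  unfold Spec_rescan_inside
  exact rescan_inside_eq org idx
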